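-- pv_equiv track=rewrite | github.com/AndrewDdantas/app_fruitFesta | services/connect.py | ajustar_cord
-- ===== SOURCE A (Python) =====
-- def ajustar_cord(row):
--
--     comma_positions = [i for i, char in enumerate(row) if char == ',']
--
--     if len(comma_positions) == 3 and comma_positions[0] in [2,3,4]:
--         row = row.replace(',','.', 1)
--         row = row[:comma_positions[2]] + '.' + row[comma_positions[2] + 1:]
--         return row.replace(' ','')
--     else:
--         return row.replace(' ','')
-- ===== SOURCE B (Python) =====
-- def ajustar_cord(row):
--     seen = 0
--     first = -1
--     out = []
--     for i, ch in enumerate(row):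
--         if ch == ',':
--             if first < 0:
--                 first = i
--             seen += 1
--             out.append(',' if seen == 2 else '.')
--         else:
--             out.append(ch)
--     if seen == 3 and first in (2, 3, 4):
--         row = ''.join(out)
--     return row.replace(' ', '')
-- ===== Notes on version B (the rewrite author's own statement) =====
-- stated objective: alternative
-- what changed: Replaces A's index-list scan plus replace-first and slice-splicing with a single pass that rewrites each comma by its running count (1st/3rd -> '.') while tracking the comma count and first comma position, keeping the rewrite only if the count is 3 and the first comma sits at index 2-4.
import Mathlib
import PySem

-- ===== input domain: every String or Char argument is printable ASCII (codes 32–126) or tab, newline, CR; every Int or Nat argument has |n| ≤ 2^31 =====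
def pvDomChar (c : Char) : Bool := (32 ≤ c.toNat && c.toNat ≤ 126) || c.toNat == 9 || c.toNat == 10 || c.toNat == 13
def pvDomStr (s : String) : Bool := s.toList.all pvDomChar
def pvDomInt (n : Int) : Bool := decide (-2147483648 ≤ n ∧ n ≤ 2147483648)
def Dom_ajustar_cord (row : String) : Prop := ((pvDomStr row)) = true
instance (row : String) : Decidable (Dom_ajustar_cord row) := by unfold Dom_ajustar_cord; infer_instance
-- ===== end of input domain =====

-- B replaces A's comma-index list + replace-first + slice-splicing by one pass that rewrites
-- commas by their running count; objective: alternative (same cost, different traversal).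


-- ===== PORT A =====
-- hand port of row.replace(',', '.', 1): old is the single char ',' and count is 1,
-- so it replaces exactly the first ',' (if any) — exact for this call
def pvReplaceFirstComma : List Char → List Char
  | [] => []
  | c :: t => if c = ',' then '.' :: t else c :: pvReplaceFirstComma t

def ajustar_cord (row : String) : String :=
  let cs := row.toList
  let comma_positions := ((PySem.List.enumerate cs 0).filter (fun p => p.2 == ',')).map (fun p => p.1)
  if comma_positions.length == 3 && [2, 3, 4].contains (PySem.List.pyGetD comma_positions 0 0) then
    let row1 := pvReplaceFirstComma cs
    let p := PySem.List.pyGetD comma_positions 2 0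
    let row2 := PySem.List.slice row1 none (some p) ++ ['.'] ++ PySem.List.slice row1 (some (p + 1)) none
    String.mk (PySem.Chars.replace row2 [' '] [])
  else
    String.mk (PySem.Chars.replace cs [' '] [])

-- ===== PORT B =====
def pvStep (st : Int × Int × List Char) (p : Int × Char) : Int × Int × List Char :=
  if p.2 == ',' then
    (st.1 + 1, (if st.2.1 < 0 then p.1 else st.2.1),
     st.2.2 ++ [if st.1 + 1 == 2 then ',' else '.'])
  else
    (st.1, st.2.1, st.2.2 ++ [p.2])

def ajustar_cord_alt (row : String) : String :=
  let cs := row.toList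
  let st := List.foldl pvStep ((0 : Int), (-1 : Int), ([] : List Char)) (PySem.List.enumerate cs 0)
  let row1 := if st.1 == 3 && [2, 3, 4].contains st.2.1 then st.2.2 else cs
  String.mk (PySem.Chars.replace row1 [' '] [])

-- ===== PRECONDITION & SPEC =====
def Spec_ajustar_cord (row : String) (out : String) : Prop := out = ajustar_cord_alt row
instance (row : String) (out : String) : Decidable (Spec_ajustar_cord row out) := by unfold Spec_ajustar_cord; infer_instance

-- ===== CLAIM (what is proved, stated in full; the proofs are below) =====
def Claim_equal_ajustar_cord : Prop := ∀ (row : String), Dom_ajustar_cord row → Spec_ajustar_cord row (ajustar_cord row)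

-- ===== LEMMAS AND PROOFS =====

-- A's comma-position comprehension, with a general enumerate start for the induction
def pvCpsFrom (cs : List Char) (s : Int) : List Int :=
  ((PySem.List.enumerate cs s).filter (fun p => p.2 == ',')).map (fun p => p.1)

lemma pvCpsFrom_def (cs : List Char) (s : Int) :
    ((PySem.List.enumerate cs s).filter (fun p => p.2 == ',')).map (fun p => p.1) = pvCpsFrom cs s := rfl

lemma pvCpsFrom_nil (s : Int) : pvCpsFrom [] s = [] := by
  simp [pvCpsFrom, PySem.List.enumerate_nil]

lemma pvCpsFrom_cons (c : Char) (t : List Char) (s : Int) :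
    pvCpsFrom (c :: t) s = if c = ',' then s :: pvCpsFrom t (s + 1) else pvCpsFrom t (s + 1) := by
  by_cases h : c = ',' <;> simp [pvCpsFrom, PySem.List.enumerate_cons, h]

lemma pvCpsFrom_append (x y : List Char) (s : Int) :
    pvCpsFrom (x ++ y) s = pvCpsFrom x s ++ pvCpsFrom y (s + x.length) := by
  simp [pvCpsFrom, PySem.List.enumerate_append]

lemma pvCpsFrom_nocomma (x : List Char) (h : ',' ∉ x) (s : Int) : pvCpsFrom x s = [] := by
  induction x generalizing s with
  | nil => exact pvCpsFrom_nil s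
  | cons c t ih =>
      simp only [List.mem_cons, not_or] at h
      rw [pvCpsFrom_cons, if_neg (fun e => h.1 e.symm), ih h.2]

lemma pvCpsFrom_length (cs : List Char) (s : Int) : (pvCpsFrom cs s).length = cs.count ',' := by
  induction cs generalizing s with
  | nil => simp [pvCpsFrom_nil]
  | cons c t ih =>
      rw [pvCpsFrom_cons]
      by_cases h : c = ',' <;> simp [h, ih]

lemma pvNatCastLt (n : Nat) : ((n : Int) < 0) = False := by simp

lemma pvFold_nocomma (x : List Char) (h : ',' ∉ x) (s v f : Int) (o : List Char) :
    List.foldl pvStep (v, f, o) (PySem.List.enumerate x s) = (v, f, o ++ x) := by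
  induction x generalizing s o with
  | nil => simp [PySem.List.enumerate_nil]
  | cons c t ih =>
      simp only [List.mem_cons, not_or] at h
      rw [PySem.List.enumerate_cons, List.foldl_cons]
      have hc : (c == ',') = false := by
        simp only [beq_eq_false_iff_ne, ne_eq]
        exact fun e => h.1 e.symm
      rw [show pvStep (v, f, o) (s, c) = (v, f, o ++ [c]) from by simp [pvStep, hc]]
      rw [ih h.2]
      simp

lemma pvFold_count (cs : List Char) (s v f : Int) (o : List Char) :
    (List.foldl pvStep (v, f, o) (PySem.List.enumerate cs s)).1 = v + cs.count ',' := by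
  induction cs generalizing s v f o with
  | nil => simp [PySem.List.enumerate_nil]
  | cons c t ih =>
      rw [PySem.List.enumerate_cons, List.foldl_cons]
      by_cases h : c = ','
      · rw [show pvStep (v, f, o) (s, c) =
            (v + 1, (if f < 0 then s else f), o ++ [if v + 1 == 2 then ',' else '.']) from by
              simp [pvStep, h]]
        rw [ih]
        simp [h]
        ring
      · rw [show pvStep (v, f, o) (s, c) = (v, f, o ++ [c]) from by
              simp [pvStep, beq_eq_false_iff_ne.mpr h]]
        rw [ih]
        simp [h]

lemma pvSplitFirst (cs : List Char) (h : ',' ∈ cs) :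
    ∃ a t, cs = a ++ ',' :: t ∧ ',' ∉ a := by
  induction cs with
  | nil => cases h
  | cons c t ih =>
      by_cases hc : c = ','
      · exact ⟨[], t, by simp [hc], by simp⟩
      · have ht : ',' ∈ t := by
          rcases List.mem_cons.mp h with e | e
          · exact absurd e.symm hc
          · exact e
        obtain ⟨a, u, he, hn⟩ := ih ht
        refine ⟨c :: a, u, by simp [he], ?_⟩
        simp only [List.mem_cons, not_or]
        exact ⟨fun e => hc e.symm, hn⟩

lemma pvSplit3 (cs : List Char) (h : cs.count ',' = 3) :
    ∃ a b c d, cs = a ++ ',' :: (b ++ ',' :: (c ++ ',' :: d)) ∧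
      ',' ∉ a ∧ ',' ∉ b ∧ ',' ∉ c ∧ ',' ∉ d := by
  have h1 : ',' ∈ cs := by
    rw [← List.count_pos_iff]
    omega
  obtain ⟨a, t1, e1, na⟩ := pvSplitFirst cs h1
  have ht1 : t1.count ',' = 2 := by
    subst e1
    rw [List.count_append, List.count_cons, List.count_eq_zero.mpr na] at h
    simp at h
    omega
  have h2 : ',' ∈ t1 := by
    rw [← List.count_pos_iff]
    omega
  obtain ⟨b, t2, e2, nb⟩ := pvSplitFirst t1 h2
  have ht2 : t2.count ',' = 1 := by
    subst e2
    rw [List.count_append, List.count_cons, List.count_eq_zero.mpr nb] at ht1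
    simp at ht1
    omega
  have h3 : ',' ∈ t2 := by
    rw [← List.count_pos_iff]
    omega
  obtain ⟨c, t3, e3, nc⟩ := pvSplitFirst t2 h3
  have ht3 : t3.count ',' = 0 := by
    subst e3
    rw [List.count_append, List.count_cons, List.count_eq_zero.mpr nc] at ht2
    simp at ht2
    omega
  exact ⟨a, b, c, t3, by rw [e1, e2, e3], na, nb, nc, List.count_eq_zero.mp ht3⟩

lemma pvRFC (a t : List Char) (h : ',' ∉ a) :
    pvReplaceFirstComma (a ++ ',' :: t) = a ++ '.' :: t := by
  induction a with
  | nil => simp [pvReplaceFirstComma]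
  | cons c u ih =>
      simp only [List.mem_cons, not_or] at h
      simp only [List.cons_append, pvReplaceFirstComma]
      rw [if_neg (fun e => h.1 e.symm), ih h.2]

lemma pvCps_decomp (a b c d : List Char) (ha : ',' ∉ a) (hb : ',' ∉ b) (hc : ',' ∉ c) (hd : ',' ∉ d) :
    pvCpsFrom (a ++ ',' :: (b ++ ',' :: (c ++ ',' :: d))) 0 =
      [((a.length : Nat) : Int), ((a.length + b.length + 1 : Nat) : Int),
        ((a.length + b.length + c.length + 2 : Nat) : Int)] := by
  rw [pvCpsFrom_append, pvCpsFrom_nocomma a ha, pvCpsFrom_cons, if_pos rfl,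
    pvCpsFrom_append, pvCpsFrom_nocomma b hb, pvCpsFrom_cons, if_pos rfl,
    pvCpsFrom_append, pvCpsFrom_nocomma c hc, pvCpsFrom_cons, if_pos rfl,
    pvCpsFrom_nocomma d hd]
  simp only [List.nil_append, List.cons.injEq, and_true]
  push_cast
  omega

lemma pvFold_decomp (a b c d : List Char) (ha : ',' ∉ a) (hb : ',' ∉ b) (hc : ',' ∉ c) (hd : ',' ∉ d) :
    List.foldl pvStep ((0 : Int), (-1 : Int), ([] : List Char))
        (PySem.List.enumerate (a ++ ',' :: (b ++ ',' :: (c ++ ',' :: d))) 0) =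
      (3, ((a.length : Nat) : Int), a ++ '.' :: (b ++ ',' :: (c ++ '.' :: d))) := by
  simp [PySem.List.enumerate_append, PySem.List.enumerate_cons, List.foldl_append,
    pvStep, pvNatCastLt, pvFold_nocomma a ha, pvFold_nocomma b hb,
    pvFold_nocomma c hc, pvFold_nocomma d hd]

theorem ajustar_cord_main (cs : List Char) :
    (if (((PySem.List.enumerate cs 0).filter (fun p => p.2 == ',')).map (fun p => p.1)).length == 3 &&
        [2, 3, 4].contains
          (PySem.List.pyGetD (((PySem.List.enumerate cs 0).filter (fun p => p.2 == ',')).map (fun p => p.1)) 0 0) then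
      PySem.List.slice (pvReplaceFirstComma cs) none
          (some (PySem.List.pyGetD
            (((PySem.List.enumerate cs 0).filter (fun p => p.2 == ',')).map (fun p => p.1)) 2 0)) ++ ['.'] ++
        PySem.List.slice (pvReplaceFirstComma cs)
          (some (PySem.List.pyGetD
            (((PySem.List.enumerate cs 0).filter (fun p => p.2 == ',')).map (fun p => p.1)) 2 0 + 1)) none
    else cs)
    = (if (List.foldl pvStep ((0 : Int), (-1 : Int), ([] : List Char)) (PySem.List.enumerate cs 0)).1 == 3 &&
          [2, 3, 4].contains
            (List.foldl pvStep ((0 : Int), (-1 : Int), ([] : List Char)) (PySem.List.enumerate cs 0)).2.1 then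
        (List.foldl pvStep ((0 : Int), (-1 : Int), ([] : List Char)) (PySem.List.enumerate cs 0)).2.2
      else cs) := by
  rw [pvCpsFrom_def]
  by_cases h3 : cs.count ',' = 3
  · obtain ⟨a, b, c, d, rfl, ha, hb, hc, hd⟩ := pvSplit3 cs h3
    rw [pvCps_decomp a b c d ha hb hc hd, pvFold_decomp a b c d ha hb hc hd,
      pvRFC a _ ha]
    by_cases hmem : ((a.length : Int) = 2 ∨ (a.length : Int) = 3 ∨ (a.length : Int) = 4)
    · rw [if_pos (by simp [PySem.List.pyGetD_ofNat', List.getD]; exact hmem),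
        if_pos (by simp; exact hmem)]
      have e1 : PySem.List.pyGetD
          ([((a.length : Nat) : Int), ((a.length + b.length + 1 : Nat) : Int),
            ((a.length + b.length + c.length + 2 : Nat) : Int)]) 2 0 =
          ((a.length + b.length + c.length + 2 : Nat) : Int) := by
        rw [PySem.List.pyGetD_ofNat']
        rfl
      rw [e1]
      have hs1 : PySem.List.slice (a ++ '.' :: (b ++ ',' :: (c ++ ',' :: d))) none
          (some ((a.length + b.length + c.length + 2 : Nat) : Int)) =
          a ++ '.' :: (b ++ ',' :: c) := by
        rw [PySem.List.slice_to _ (Int.natCast_nonneg _), Int.toNat_natCast]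
        rw [show a ++ '.' :: (b ++ ',' :: (c ++ ',' :: d)) =
            (a ++ '.' :: (b ++ ',' :: c)) ++ ',' :: d from by simp]
        rw [List.take_left' (by simp; omega)]
      have hs2 : PySem.List.slice (a ++ '.' :: (b ++ ',' :: (c ++ ',' :: d)))
          (some (((a.length + b.length + c.length + 2 : Nat) : Int) + 1)) none =
          d := by
        rw [show (((a.length + b.length + c.length + 2 : Nat) : Int) + 1) =
            ((a.length + b.length + c.length + 3 : Nat) : Int) from by push_cast; ring]
        rw [PySem.List.slice_from _ (Int.natCast_nonneg _), Int.toNat_natCast]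
        rw [show a ++ '.' :: (b ++ ',' :: (c ++ ',' :: d)) =
            (a ++ '.' :: (b ++ ',' :: (c ++ [',']))) ++ d from by simp]
        rw [List.drop_left' (by simp; omega)]
      rw [hs1, hs2]
      simp
    · rw [not_or, not_or] at hmem
      obtain ⟨h1, h2, h3'⟩ := hmem
      have hmem : ¬(a.length : Int) = 2 ∧ ¬(a.length : Int) = 3 ∧ ¬(a.length : Int) = 4 := ⟨h1, h2, h3'⟩
      rw [if_neg (by simp [PySem.List.pyGetD_ofNat', List.getD]; exact hmem),
        if_neg (by simp; exact hmem)]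
  · rw [if_neg, if_neg]
    · intro hB
      rw [Bool.and_eq_true] at hB
      have := pvFold_count cs 0 0 (-1) []
      rw [this] at hB
      have : ((cs.count ',' : Int)) = 3 := by
        have := hB.1
        simp at this
        omega
      exact h3 (by exact_mod_cast this)
    · intro hA
      rw [Bool.and_eq_true] at hA
      have := pvCpsFrom_length cs 0
      have hl : (pvCpsFrom cs 0).length = 3 := by
        have := hA.1
        simpa using this
      exact h3 (by rw [← pvCpsFrom_length cs 0, hl])

-- ===== VERDICT (by name: the statement is the Claim_ definition above) =====
theorem ajustar_cord_spec : Claim_equal_ajustar_cord := by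
  intro row _
  unfold Spec_ajustar_cord ajustar_cord ajustar_cord_alt
  simp only [← apply_ite (fun l : List Char => String.mk (PySem.Chars.replace l [' '] []))]
  exact congrArg (fun l => String.mk (PySem.Chars.replace l [' '] []))
    (ajustar_cord_main row.toList)
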